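-- pv_equiv track=rewrite | github.com/Yoshizumi-Ryo/ellell-isogeny_sage | BSIDH_attack_sage/func_additions.py | Is_RR
-- ===== SOURCE A (Python) =====
-- RR_set={(i,j,k,l) for i in range(0,4) for j in range(0,4) for k in range(0,4) for l in range(0,4) if (i//2+j//2+k//2+l//2)%2==0 and (i%2+j%2+k%2+l%2)%2==0}
--
-- def RR_product_term(lv2_x,lv2_y,chi,i,j):
--     sum=0
--     for t in range(0,4):
--         chi_t=(-1)**((chi//2)*(t//2)+(chi%2)*(t%2))
--         ipt=2*((i//2+t//2)%2)+(i%2+t%2)%2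
--         jpt=2*((j//2+t//2)%2)+(j%2+t%2)%2
--         sum+=chi_t*lv2_x[ipt]*lv2_y[jpt]
--     return sum
--
-- def Is_RR(lv2_1,lv2_2,lv2_3,lv2_4,lv2_5,lv2_6,lv2_7,lv2_8):
--     for chi in range(0,4):
--         for ijkl in RR_set:
--             LHS1=RR_product_term(lv2_1,lv2_2,chi,ijkl[0],ijkl[1])
--             LHS2=RR_product_term(lv2_3,lv2_4,chi,ijkl[2],ijkl[3])
--             RHS1=RR_product_term(lv2_5,lv2_6,chi,ijkl[0],ijkl[1])
--             RHS2=RR_product_term(lv2_7,lv2_8,chi,ijkl[2],ijkl[3])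
--             if LHS1*LHS2!=RHS1*RHS2:
--                 return False
--     return True
-- ===== SOURCE B (Python) =====
-- def _term(x, y, chi, a, b):
--     s = 0
--     for t in range(4):
--         sign = -1 if ((chi // 2) * (t // 2) + (chi % 2) * (t % 2)) % 2 else 1
--         at = 2 * ((a // 2 + t // 2) % 2) + (a % 2 + t % 2) % 2
--         bt = 2 * ((b // 2 + t // 2) % 2) + (b % 2 + t % 2) % 2
--         s += sign * x[at] * y[bt]
--     return s
--
-- def Is_RR(lv2_1, lv2_2, lv2_3, lv2_4, lv2_5, lv2_6, lv2_7, lv2_8):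
--     # Phase 1: four precomputed 4x4x4 tables, one per input pair, indexed [chi][a][b].
--     pairs = ((lv2_1, lv2_2), (lv2_3, lv2_4), (lv2_5, lv2_6), (lv2_7, lv2_8))
--     T = [[[[_term(x, y, chi, a, b) for b in range(4)] for a in range(4)]
--           for chi in range(4)] for (x, y) in pairs]
--     # Phase 2: a pure lookup pass over chi and the Riemann index set.
--     quads = [(i, j, k, l)
--              for i in range(4) for j in range(4) for k in range(4) for l in range(4)
--              if (i // 2 + j // 2 + k // 2 + l // 2) % 2 == 0
--              and (i % 2 + j % 2 + k % 2 + l % 2) % 2 == 0]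
--     return all(T[0][chi][i][j] * T[1][chi][k][l] == T[2][chi][i][j] * T[3][chi][k][l]
--                for chi in range(4) for (i, j, k, l) in quads)
-- ===== Notes on version B (the rewrite author's own statement) =====
-- stated objective: alternative
-- what changed: B splits the computation into two separate phases: it first fills four precomputed [chi][a][b] tables of product terms (one per input pair) and then runs a pure lookup-and-compare pass over chi and the Riemann index set, instead of A's single pass that recomputes four product terms inside the innermost loop.
import Mathlib
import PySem

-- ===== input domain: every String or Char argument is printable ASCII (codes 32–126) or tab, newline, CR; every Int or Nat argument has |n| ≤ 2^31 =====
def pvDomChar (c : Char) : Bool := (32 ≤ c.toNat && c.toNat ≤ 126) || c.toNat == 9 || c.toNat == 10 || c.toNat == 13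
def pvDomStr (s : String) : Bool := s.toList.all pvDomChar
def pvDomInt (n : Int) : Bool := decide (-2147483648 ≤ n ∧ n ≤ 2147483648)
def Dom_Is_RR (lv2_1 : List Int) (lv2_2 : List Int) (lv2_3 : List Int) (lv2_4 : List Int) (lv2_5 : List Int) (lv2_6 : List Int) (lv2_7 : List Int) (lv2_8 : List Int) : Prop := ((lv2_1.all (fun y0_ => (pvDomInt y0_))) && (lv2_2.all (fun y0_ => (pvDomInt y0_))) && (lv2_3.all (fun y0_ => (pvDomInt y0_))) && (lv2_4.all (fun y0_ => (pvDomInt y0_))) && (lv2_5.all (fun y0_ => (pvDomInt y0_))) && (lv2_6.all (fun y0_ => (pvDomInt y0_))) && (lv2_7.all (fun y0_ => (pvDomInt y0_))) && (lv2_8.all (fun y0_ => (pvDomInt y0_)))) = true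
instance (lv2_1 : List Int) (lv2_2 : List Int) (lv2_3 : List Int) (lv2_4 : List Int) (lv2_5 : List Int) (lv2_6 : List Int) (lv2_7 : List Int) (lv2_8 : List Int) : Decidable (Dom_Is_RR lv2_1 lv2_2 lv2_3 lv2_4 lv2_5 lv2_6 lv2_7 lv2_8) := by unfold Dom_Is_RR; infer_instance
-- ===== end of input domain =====

-- B builds four precomputed [chi][a][b] term tables and then runs a pure lookup pass over the Riemann
-- index set, instead of A's recomputation of all four product terms inside the innermost loop (objective: alternative).


-- ===== PORT A =====
-- RR_set: the module-level set comprehension, ported as the list of its (distinct) elements;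
-- iteration order is irrelevant to Is_RR's value, which is an all-pass check over the set.
def rrSetA : List (Int × Int × Int × Int) :=
  ((PySem.List.pyRange 0 4 1).flatMap fun i =>
    (PySem.List.pyRange 0 4 1).flatMap fun j =>
      (PySem.List.pyRange 0 4 1).flatMap fun k =>
        (PySem.List.pyRange 0 4 1).filterMap fun l =>
          if PySem.Int.mod (PySem.Int.floordiv i 2 + PySem.Int.floordiv j 2 + PySem.Int.floordiv k 2 + PySem.Int.floordiv l 2) 2 = 0
             ∧ PySem.Int.mod (PySem.Int.mod i 2 + PySem.Int.mod j 2 + PySem.Int.mod k 2 + PySem.Int.mod l 2) 2 = 0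
          then some (i, j, k, l) else none)

-- RR_product_term; lv2_x[ipt] is ported as pyGetD _ _ 0, exact under Pre_ (all indices are in 0..3
-- and every list has length ≥ 4). The exponent of (-1) is nonnegative here, so .toNat is exact.
def RR_product_term_A (lv2_x lv2_y : List Int) (chi i j : Int) : Int :=
  (PySem.List.pyRange 0 4 1).foldl (fun sum t =>
    let chi_t : Int := (-1) ^ ((PySem.Int.floordiv chi 2 * PySem.Int.floordiv t 2 + PySem.Int.mod chi 2 * PySem.Int.mod t 2)).toNat
    let ipt := 2 * PySem.Int.mod (PySem.Int.floordiv i 2 + PySem.Int.floordiv t 2) 2 + PySem.Int.mod (PySem.Int.mod i 2 + PySem.Int.mod t 2) 2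
    let jpt := 2 * PySem.Int.mod (PySem.Int.floordiv j 2 + PySem.Int.floordiv t 2) 2 + PySem.Int.mod (PySem.Int.mod j 2 + PySem.Int.mod t 2) 2
    sum + chi_t * PySem.List.pyGetD lv2_x ipt 0 * PySem.List.pyGetD lv2_y jpt 0) 0

-- the for/for loop with early 'return False' ≡ an all-pass over the two concrete iterables
def Is_RR (lv2_1 : List Int) (lv2_2 : List Int) (lv2_3 : List Int) (lv2_4 : List Int) (lv2_5 : List Int) (lv2_6 : List Int) (lv2_7 : List Int) (lv2_8 : List Int) : Bool :=
  (PySem.List.pyRange 0 4 1).all fun chi =>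
    rrSetA.all fun ijkl =>
      let LHS1 := RR_product_term_A lv2_1 lv2_2 chi ijkl.1 ijkl.2.1
      let LHS2 := RR_product_term_A lv2_3 lv2_4 chi ijkl.2.2.1 ijkl.2.2.2
      let RHS1 := RR_product_term_A lv2_5 lv2_6 chi ijkl.1 ijkl.2.1
      let RHS2 := RR_product_term_A lv2_7 lv2_8 chi ijkl.2.2.1 ijkl.2.2.2
      LHS1 * LHS2 == RHS1 * RHS2

-- ===== PORT B =====
-- _term of Source B (sign via a parity test instead of (-1)**e)
def termB (x y : List Int) (chi a b : Int) : Int :=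
  (PySem.List.pyRange 0 4 1).foldl (fun s t =>
    let sign : Int := if PySem.Int.mod (PySem.Int.floordiv chi 2 * PySem.Int.floordiv t 2 + PySem.Int.mod chi 2 * PySem.Int.mod t 2) 2 ≠ 0 then -1 else 1
    let at_ := 2 * PySem.Int.mod (PySem.Int.floordiv a 2 + PySem.Int.floordiv t 2) 2 + PySem.Int.mod (PySem.Int.mod a 2 + PySem.Int.mod t 2) 2
    let bt := 2 * PySem.Int.mod (PySem.Int.floordiv b 2 + PySem.Int.floordiv t 2) 2 + PySem.Int.mod (PySem.Int.mod b 2 + PySem.Int.mod t 2) 2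
    s + sign * PySem.List.pyGetD x at_ 0 * PySem.List.pyGetD y bt 0) 0

def Is_RR_alt (lv2_1 : List Int) (lv2_2 : List Int) (lv2_3 : List Int) (lv2_4 : List Int) (lv2_5 : List Int) (lv2_6 : List Int) (lv2_7 : List Int) (lv2_8 : List Int) : Bool :=
  let pairs : List (List Int × List Int) := [(lv2_1, lv2_2), (lv2_3, lv2_4), (lv2_5, lv2_6), (lv2_7, lv2_8)]
  -- Phase 1: four precomputed [chi][a][b] tables, one per input pair
  let T : List (List (List (List Int))) :=
    pairs.map fun xy =>
      (PySem.List.pyRange 0 4 1).map fun chi =>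
        (PySem.List.pyRange 0 4 1).map fun a =>
          (PySem.List.pyRange 0 4 1).map fun b => termB xy.1 xy.2 chi a b
  let quads : List (Int × Int × Int × Int) :=
    (PySem.List.pyRange 0 4 1).flatMap fun i =>
      (PySem.List.pyRange 0 4 1).flatMap fun j =>
        (PySem.List.pyRange 0 4 1).flatMap fun k =>
          (PySem.List.pyRange 0 4 1).filterMap fun l =>
            if PySem.Int.mod (PySem.Int.floordiv i 2 + PySem.Int.floordiv j 2 + PySem.Int.floordiv k 2 + PySem.Int.floordiv l 2) 2 = 0
               ∧ PySem.Int.mod (PySem.Int.mod i 2 + PySem.Int.mod j 2 + PySem.Int.mod k 2 + PySem.Int.mod l 2) 2 = 0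
            then some (i, j, k, l) else none
  -- Phase 2: a pure lookup-and-compare pass
  let look (p chi a b : Int) : Int :=
    PySem.List.pyGetD (PySem.List.pyGetD (PySem.List.pyGetD (PySem.List.pyGetD T p []) chi []) a []) b 0
  (PySem.List.pyRange 0 4 1).all fun chi =>
    quads.all fun q =>
      look 0 chi q.1 q.2.1 * look 1 chi q.2.2.1 q.2.2.2 == look 2 chi q.1 q.2.1 * look 3 chi q.2.2.1 q.2.2.2

-- ===== PRECONDITION & SPEC =====
-- Pre_: A indexes every list at positions 0..3, so it raises IndexError (as does B) unless all
-- eight lists have length ≥ 4; exactly those crashing inputs are excluded.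
def Pre_Is_RR (lv2_1 : List Int) (lv2_2 : List Int) (lv2_3 : List Int) (lv2_4 : List Int) (lv2_5 : List Int) (lv2_6 : List Int) (lv2_7 : List Int) (lv2_8 : List Int) : Prop :=
  4 ≤ lv2_1.length ∧ 4 ≤ lv2_2.length ∧ 4 ≤ lv2_3.length ∧ 4 ≤ lv2_4.length ∧
  4 ≤ lv2_5.length ∧ 4 ≤ lv2_6.length ∧ 4 ≤ lv2_7.length ∧ 4 ≤ lv2_8.length
instance (lv2_1 : List Int) (lv2_2 : List Int) (lv2_3 : List Int) (lv2_4 : List Int) (lv2_5 : List Int) (lv2_6 : List Int) (lv2_7 : List Int) (lv2_8 : List Int) : Decidable (Pre_Is_RR lv2_1 lv2_2 lv2_3 lv2_4 lv2_5 lv2_6 lv2_7 lv2_8) := by unfold Pre_Is_RR; infer_instance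
def pvWitness_Is_RR : List Int × List Int × List Int × List Int × List Int × List Int × List Int × List Int :=
  ([1,2,3,4], [1,2,3,4], [1,2,3,4], [1,2,3,4], [1,2,3,4], [1,2,3,4], [1,2,3,4], [1,2,3,4])

def Spec_Is_RR (lv2_1 : List Int) (lv2_2 : List Int) (lv2_3 : List Int) (lv2_4 : List Int) (lv2_5 : List Int) (lv2_6 : List Int) (lv2_7 : List Int) (lv2_8 : List Int) (out : Bool) : Prop := out = Is_RR_alt lv2_1 lv2_2 lv2_3 lv2_4 lv2_5 lv2_6 lv2_7 lv2_8
instance (lv2_1 : List Int) (lv2_2 : List Int) (lv2_3 : List Int) (lv2_4 : List Int) (lv2_5 : List Int) (lv2_6 : List Int) (lv2_7 : List Int) (lv2_8 : List Int) (out : Bool) : Decidable (Spec_Is_RR lv2_1 lv2_2 lv2_3 lv2_4 lv2_5 lv2_6 lv2_7 lv2_8 out) := by unfold Spec_Is_RR; infer_instance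

-- ===== CLAIM (what is proved, stated in full; the proofs are below) =====
def Claim_equal_Is_RR : Prop := ∀ (lv2_1 : List Int) (lv2_2 : List Int) (lv2_3 : List Int) (lv2_4 : List Int) (lv2_5 : List Int) (lv2_6 : List Int) (lv2_7 : List Int) (lv2_8 : List Int), Dom_Is_RR lv2_1 lv2_2 lv2_3 lv2_4 lv2_5 lv2_6 lv2_7 lv2_8 → Pre_Is_RR lv2_1 lv2_2 lv2_3 lv2_4 lv2_5 lv2_6 lv2_7 lv2_8 → Spec_Is_RR lv2_1 lv2_2 lv2_3 lv2_4 lv2_5 lv2_6 lv2_7 lv2_8 (Is_RR lv2_1 lv2_2 lv2_3 lv2_4 lv2_5 lv2_6 lv2_7 lv2_8)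

-- ===== LEMMAS AND PROOFS =====
theorem pyRange4 : PySem.List.pyRange 0 4 1 = [0, 1, 2, 3] := by decide

theorem neg_one_pow_emod (e : Int) (he : 0 ≤ e) :
    ((-1 : Int)) ^ e.toNat = if e % 2 ≠ 0 then (-1 : Int) else 1 := by
  rcases Int.even_or_odd e with ⟨k, hk⟩ | ⟨k, hk⟩
  · have h2 : e % 2 = 0 := by omega
    have hn : Even e.toNat := by rw [Nat.even_iff]; omega
    simp [h2, Even.neg_one_pow hn]
  · have h2 : e % 2 = 1 := by omega
    have hn : Odd e.toNat := by rw [Nat.odd_iff]; omega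
    simp [h2, Odd.neg_one_pow hn]

-- A's (-1)**e sign and B's parity-test sign agree, so the two product-term loops compute the same sums.
theorem termB_eq (x y : List Int) (chi a b : Int) (h : 0 ≤ chi) :
    RR_product_term_A x y chi a b = termB x y chi a b := by
  unfold RR_product_term_A termB
  rw [pyRange4]
  simp only [List.foldl,
    PySem.Int.floordiv_eq_ediv_of_pos (show (0 : Int) < 2 by norm_num),
    PySem.Int.mod_eq_emod_of_pos (show (0 : Int) < 2 by norm_num)]
  have hd : 0 ≤ chi / 2 := Int.ediv_nonneg h (by norm_num)
  have hm : 0 ≤ chi % 2 := Int.emod_nonneg chi (by norm_num)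
  norm_num [neg_one_pow_emod _ hd, neg_one_pow_emod _ hm,
    neg_one_pow_emod _ (show (0 : Int) ≤ chi / 2 + chi % 2 by omega)]

theorem list_all_congr_mem {α : Type} (l : List α) (f g : α → Bool)
    (h : ∀ a ∈ l, f a = g a) : l.all f = l.all g := by
  induction l with
  | nil => rfl
  | cons x xs ih =>
    simp only [List.all_cons, h x (List.mem_cons_self),
      ih (fun a ha => h a (List.mem_cons_of_mem _ ha))]

theorem mem_rrSetA_bounds (q : Int × Int × Int × Int) (hq : q ∈ rrSetA) :
    0 ≤ q.1 ∧ q.1 < 4 ∧ 0 ≤ q.2.1 ∧ q.2.1 < 4 ∧ 0 ≤ q.2.2.1 ∧ q.2.2.1 < 4 ∧ 0 ≤ q.2.2.2 ∧ q.2.2.2 < 4 := by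
  unfold rrSetA at hq
  simp only [List.mem_flatMap, List.mem_filterMap, PySem.List.mem_pyRange_one] at hq
  obtain ⟨i, hi, j, hj, k, hk, l, hl, hcond⟩ := hq
  split at hcond
  · cases hcond; simp only; omega
  · cases hcond

theorem is_rr_eq (lv2_1 lv2_2 lv2_3 lv2_4 lv2_5 lv2_6 lv2_7 lv2_8 : List Int) :
    Is_RR lv2_1 lv2_2 lv2_3 lv2_4 lv2_5 lv2_6 lv2_7 lv2_8 = Is_RR_alt lv2_1 lv2_2 lv2_3 lv2_4 lv2_5 lv2_6 lv2_7 lv2_8 := by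
  unfold Is_RR Is_RR_alt
  simp only [List.map_cons, List.map_nil]
  apply list_all_congr_mem
  intro chi hchi
  rw [PySem.List.mem_pyRange_one] at hchi
  apply list_all_congr_mem
  intro q hq
  have hb := mem_rrSetA_bounds q (by rw [rrSetA]; exact hq)
  obtain ⟨h1, h2, h3, h4, h5, h6, h7, h8⟩ := hb
  simp only [PySem.List.pyGetD_zero_cons]
  rw [show ∀ (t0 t1 t2 t3 : List (List (List Int))), PySem.List.pyGetD [t0, t1, t2, t3] (1 : Int) [] = t1 from fun _ _ _ _ => rfl,
      show ∀ (t0 t1 t2 t3 : List (List (List Int))), PySem.List.pyGetD [t0, t1, t2, t3] (2 : Int) [] = t2 from fun _ _ _ _ => rfl,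
      show ∀ (t0 t1 t2 t3 : List (List (List Int))), PySem.List.pyGetD [t0, t1, t2, t3] (3 : Int) [] = t3 from fun _ _ _ _ => rfl]
  simp only [PySem.List.pyGetD_map_pyRange_of_nonneg _ _ _ _ hchi.1 hchi.2,
      PySem.List.pyGetD_map_pyRange_of_nonneg _ _ _ _ h1 h2,
      PySem.List.pyGetD_map_pyRange_of_nonneg _ _ _ _ h3 h4,
      PySem.List.pyGetD_map_pyRange_of_nonneg _ _ _ _ h5 h6,
      PySem.List.pyGetD_map_pyRange_of_nonneg _ _ _ _ h7 h8]
  simp only [termB_eq _ _ _ _ _ hchi.1]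

-- ===== VERDICT (by name: the statement is the Claim_ definition above) =====
theorem Is_RR_spec : Claim_equal_Is_RR := by
  intro a1 a2 a3 a4 a5 a6 a7 a8 _ _
  exact is_rr_eq a1 a2 a3 a4 a5 a6 a7 a8
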